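-- pv_equiv track=rewrite | github.com/phpet/aoc | 2024/day04/day04.py | find_2_diagonal_words_in_matrix
-- ===== SOURCE A (Python) =====
-- def find_2_diagonal_words_in_matrix(matrix, word):
--     rows = len(matrix)
--     cols = len(matrix[0])
--     word_length = len(word)
--
--     def check_direction(r, c, dr, dc, reverse=False):
--         for i in range(word_length):
--             nr = r + i * dr
--             nc = c + i * dc
--             char_index = i
--
--             if reverse:
--                 char_index = word_length - i - 1
--
--             if (
--                 nr < 0
--                 or nr >= rows
--                 or nc < 0
--                 or nc >= cols
--                 or matrix[nr][nc] != word[char_index]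
--             ):
--                 return False  # word not found in this direction
--
--         return True  # word found in this direction
--
--     count = 0
--
--     for r in range(rows):
--         for c in range(cols):
--             # check down-right
--             found_down_right = check_direction(r, c, 1, 1) or check_direction(
--                 r, c, 1, 1, reverse=True
--             )
--
--             # check down-left
--             found_down_left = check_direction(r, c + 2, 1, -1) or check_direction(
--                 r, c + 2, 1, -1, reverse=True
--             )
--
--             if found_down_right and found_down_left:
--                 count += 1
--
--     return count
-- ===== SOURCE B (Python) =====
-- def find_2_diagonal_words_in_matrix(matrix, word):
--     rows = len(matrix)
--     cols = len(matrix[0])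
--     L = len(word)
--     if L == 0:
--         # the empty word matches at every cell in both directions
--         return rows * cols
--     W = list(word)
--     Rv = W[::-1]
--
--     def starts(line):
--         # line: the cells of one diagonal, in walk order; return the set of
--         # start coordinates where a window of length L equals word or its reverse
--         out = set()
--         cells = [matrix[r][c] for (r, c) in line]
--         for p in range(len(cells) - L + 1):
--             seg = cells[p:p + L]
--             if seg == W or seg == Rv:
--                 out.add(line[p])
--         return out
--
--     dr_starts = set()
--     for d in range(-(rows - 1), cols):          # down-right diagonals, keyed by c - r
--         dr_starts |= starts([(r, r + d) for r in range(max(0, -d), min(rows, cols - d))])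
--     dl_starts = set()
--     for d in range(rows + cols - 1):            # down-left diagonals, keyed by c + r
--         dl_starts |= starts([(r, d - r) for r in range(max(0, d - (cols - 1)), min(rows, d + 1))])
--
--     return sum(1 for (r, c) in dr_starts if (r, c + 2) in dl_starts)
-- ===== Notes on version B (the rewrite author's own statement) =====
-- stated objective: faster
-- what changed: B traverses the grid diagonal by diagonal instead of cell by cell: it enumerates each down-right and down-left diagonal line once, slides a length-L window along it comparing the window slice to the word or its reverse, collects the matching start coordinates into two sets, and finally counts pairs (r,c) in the down-right set whose partner (r,c+2) is in the down-left set, whereas A re-walks a diagonal character by character from every cell via four check_direction calls.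
import Mathlib
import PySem

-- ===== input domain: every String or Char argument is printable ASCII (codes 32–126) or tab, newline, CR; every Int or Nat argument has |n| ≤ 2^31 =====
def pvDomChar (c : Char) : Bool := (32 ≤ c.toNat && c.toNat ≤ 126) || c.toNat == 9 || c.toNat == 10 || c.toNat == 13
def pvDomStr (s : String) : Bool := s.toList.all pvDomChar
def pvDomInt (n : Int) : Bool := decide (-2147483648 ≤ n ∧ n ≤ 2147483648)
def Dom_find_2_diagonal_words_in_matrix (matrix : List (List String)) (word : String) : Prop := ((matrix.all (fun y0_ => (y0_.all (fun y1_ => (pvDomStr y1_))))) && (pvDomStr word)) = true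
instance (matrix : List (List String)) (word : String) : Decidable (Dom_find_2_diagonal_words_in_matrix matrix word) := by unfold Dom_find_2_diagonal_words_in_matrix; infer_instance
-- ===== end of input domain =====

-- B counts the X-shapes by walking each diagonal line once with a sliding window and intersecting
-- two sets of match-start coordinates, instead of A's per-cell re-walk of both diagonals; proved
-- equal to A on every input where A returns (Pre_ excludes only A's IndexError crashes).


-- matrix[nr][nc], total form (both ports only read it at in-range indices on inputs inside Pre_)
def pvCell (matrix : List (List String)) (nr nc : Int) : String :=
  PySem.List.pyGetD (PySem.List.pyGetD matrix nr []) nc ""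

-- ===== PORT A =====
-- check_direction: the early-return loop over range(word_length) is the conjunction over that range
def pvA_check (matrix : List (List String)) (word : String)
    (rows cols wl r c dr dc : Int) (reverse : Bool) : Bool :=
  (PySem.List.pyRange 0 wl 1).all (fun i =>
    !(decide (r + i * dr < 0) || decide (rows ≤ r + i * dr) ||
      decide (c + i * dc < 0) || decide (cols ≤ c + i * dc) ||
      decide (pvCell matrix (r + i * dr) (c + i * dc) ≠
        String.ofList [PySem.List.pyGetD word.toList (if reverse then wl - i - 1 else i) ' '])))

def find_2_diagonal_words_in_matrix (matrix : List (List String)) (word : String) : Int :=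
  let rows := PySem.List.len matrix
  let cols := PySem.List.len (PySem.List.pyGetD matrix 0 [])
  let wl := PySem.Str.len word
  (PySem.List.pyRange 0 rows 1).foldl (fun count r =>
    (PySem.List.pyRange 0 cols 1).foldl (fun count c =>
      if (pvA_check matrix word rows cols wl r c 1 1 false ||
          pvA_check matrix word rows cols wl r c 1 1 true) &&
         (pvA_check matrix word rows cols wl r (c + 2) 1 (-1) false ||
          pvA_check matrix word rows cols wl r (c + 2) 1 (-1) true)
      then count + 1 else count) count) 0

-- ===== PORT B =====
-- starts(line): slide a length-L window along one diagonal's cells, collect matching start coords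
def pvB_starts (matrix : List (List String)) (L : Int) (W Rv : List String)
    (line : List (Int × Int)) : PySem.Set (Int × Int) :=
  let cells := line.map (fun rc => pvCell matrix rc.1 rc.2)
  (PySem.List.pyRange 0 (PySem.List.len cells - L + 1) 1).foldl
    (fun out p =>
      let seg := PySem.List.slice cells (some p) (some (p + L))
      if seg == W || seg == Rv
      then PySem.Set.add out (PySem.List.pyGetD line p (0, 0))  -- line[p]: p is in range here
      else out)
    PySem.Set.empty

def find_2_diagonal_words_in_matrix_alt (matrix : List (List String)) (word : String) : Int :=
  let rows := PySem.List.len matrix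
  let cols := PySem.List.len (PySem.List.pyGetD matrix 0 [])
  let L := PySem.Str.len word
  if L == 0 then rows * cols  -- the empty word matches at every cell in both directions
  else
    let W : List String := word.toList.map (fun ch => String.ofList [ch])
    let Rv := W.reverse
    let dr_starts := (PySem.List.pyRange (-(rows - 1)) cols 1).foldl
      (fun s d => PySem.Set.union s
        (pvB_starts matrix L W Rv
          ((PySem.List.pyRange (max 0 (-d)) (min rows (cols - d)) 1).map (fun r => (r, r + d)))))
      PySem.Set.empty
    let dl_starts := (PySem.List.pyRange 0 (rows + cols - 1) 1).foldl
      (fun s d => PySem.Set.union s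
        (pvB_starts matrix L W Rv
          ((PySem.List.pyRange (max 0 (d - (cols - 1))) (min rows (d + 1)) 1).map (fun r => (r, d - r)))))
      PySem.Set.empty
    dr_starts.foldl (fun acc rc =>
      if PySem.Set.contains dl_starts (rc.1, rc.2 + 2) then acc + 1 else acc) 0

-- ===== PRECONDITION & SPEC =====
-- Pre_ excludes exactly the inputs on which A raises IndexError: the empty matrix (matrix[0]) and,
-- for a non-empty word, matrices with a row shorter than the first row (the first character probe
-- matrix[r][c] then indexes past that row's end).
def Pre_find_2_diagonal_words_in_matrix (matrix : List (List String)) (word : String) : Prop :=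
  matrix ≠ [] ∧ (word.toList = [] ∨ ∀ row ∈ matrix, (matrix.headD []).length ≤ row.length)
instance (matrix : List (List String)) (word : String) : Decidable (Pre_find_2_diagonal_words_in_matrix matrix word) := by unfold Pre_find_2_diagonal_words_in_matrix; infer_instance

def pvWitness_find_2_diagonal_words_in_matrix : List (List String) × String := ([["a"]], "a")

def Spec_find_2_diagonal_words_in_matrix (matrix : List (List String)) (word : String) (out : Int) : Prop := out = find_2_diagonal_words_in_matrix_alt matrix word
instance (matrix : List (List String)) (word : String) (out : Int) : Decidable (Spec_find_2_diagonal_words_in_matrix matrix word out) := by unfold Spec_find_2_diagonal_words_in_matrix; infer_instance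

-- ===== CLAIM (what is proved, stated in full; the proofs are below) =====
def Claim_equal_find_2_diagonal_words_in_matrix : Prop := ∀ (matrix : List (List String)) (word : String), Dom_find_2_diagonal_words_in_matrix matrix word → Pre_find_2_diagonal_words_in_matrix matrix word → Spec_find_2_diagonal_words_in_matrix matrix word (find_2_diagonal_words_in_matrix matrix word)

-- ===== LEMMAS AND PROOFS =====

-- the diagonal of length L with step (+1, dc) starting at (r, c) spells W forward or backward
def pvDiagEq (matrix : List (List String)) (W Rv : List String) (L dc r c : Int) : Prop :=
  (PySem.List.pyRange 0 L 1).map (fun i => pvCell matrix (r + i) (c + i * dc)) = W ∨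
  (PySem.List.pyRange 0 L 1).map (fun i => pvCell matrix (r + i) (c + i * dc)) = Rv

-- closed form of "down-right match starts at (r,c)" / "down-left match starts at (r,c)"
def pvDR (matrix : List (List String)) (rows cols L : Int) (W Rv : List String) (r c : Int) : Prop :=
  0 ≤ r ∧ r + L ≤ rows ∧ 0 ≤ c ∧ c + L ≤ cols ∧ pvDiagEq matrix W Rv L 1 r c
def pvDL (matrix : List (List String)) (rows cols L : Int) (W Rv : List String) (r c : Int) : Prop :=
  0 ≤ r ∧ r + L ≤ rows ∧ L - 1 ≤ c ∧ c < cols ∧ pvDiagEq matrix W Rv L (-1) r c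

theorem pv_all_pyRange_iff (p : Int → Bool) (n : Int) :
    (PySem.List.pyRange 0 n 1).all p = true ↔ ∀ i : Int, 0 ≤ i → i < n → p i = true := by
  rw [List.all_eq_true]
  constructor
  · intro h i h1 h2
    exact h i (by rw [PySem.List.mem_pyRange_one]; omega)
  · intro h i hi
    rw [PySem.List.mem_pyRange_one] at hi
    exact h i hi.1 hi.2

theorem pv_checkA_iff (matrix : List (List String)) (word : String)
    (rows cols wl r c dc : Int) (rev : Bool) :
    pvA_check matrix word rows cols wl r c 1 dc rev = true ↔
      ∀ i : Int, 0 ≤ i → i < wl →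
        0 ≤ r + i ∧ r + i < rows ∧ 0 ≤ c + i * dc ∧ c + i * dc < cols ∧
        pvCell matrix (r + i) (c + i * dc) =
          String.ofList [PySem.List.pyGetD word.toList (if rev then wl - i - 1 else i) ' '] := by
  unfold pvA_check
  rw [pv_all_pyRange_iff]
  constructor
  · intro h i h1 h2
    have := h i h1 h2
    simp only [mul_one] at this ⊢
    simp only [Bool.not_eq_eq_eq_not, Bool.not_true, Bool.or_eq_false_iff,
      decide_eq_false_iff_not, not_lt, not_le, not_not] at this
    tauto
  · intro h i h1 h2
    have := h i h1 h2
    simp only [mul_one]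
    simp only [Bool.not_eq_eq_eq_not, Bool.not_true, Bool.or_eq_false_iff,
      decide_eq_false_iff_not, not_lt, not_le, not_not]
    tauto

theorem pv_map_pyRange_eq_iff {α : Type} (f : Int → α) (ys : List α) (n : Int) (_hn : 0 ≤ n)
    (hlen : ys.length = n.toNat) :
    (PySem.List.pyRange 0 n 1).map f = ys ↔
      ∀ (k : Nat) (hk : k < n.toNat), f (k : Int) = ys[k] := by
  constructor
  · intro h k hk
    have hk' : k < ((PySem.List.pyRange 0 n 1).map f).length := by
      simp [PySem.List.length_pyRange_one]; omega
    have : ((PySem.List.pyRange 0 n 1).map f)[k]'hk' = ys[k]'(by omega) := by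
      simp only [h]
    simpa [List.getElem_map, PySem.List.getElem_pyRange_one] using this
  · intro h
    apply List.ext_getElem
    · simp [PySem.List.length_pyRange_one]; omega
    · intro k h1 h2
      simpa [List.getElem_map, PySem.List.getElem_pyRange_one] using h k (by omega)

-- A's "forward or reversed" per-character walk, as the closed bounds-and-diagonal condition
theorem pv_check_or_iff (matrix : List (List String)) (word : String)
    (rows cols dc : Int) (hdc : dc = 1 ∨ dc = -1) (r c : Int)
    (hw : word.toList ≠ []) :
    ((pvA_check matrix word rows cols ((word.toList.length : Int)) r c 1 dc false ||
      pvA_check matrix word rows cols ((word.toList.length : Int)) r c 1 dc true) = true) ↔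
      ((0 ≤ r ∧ r + (word.toList.length : Int) ≤ rows ∧
        0 ≤ min c (c + ((word.toList.length : Int) - 1) * dc) ∧
        max c (c + ((word.toList.length : Int) - 1) * dc) < cols) ∧
       pvDiagEq matrix (word.toList.map (fun ch => String.ofList [ch]))
         ((word.toList.map (fun ch => String.ofList [ch])).reverse)
         ((word.toList.length : Int)) dc r c) := by
  have hL1 : 1 ≤ (word.toList.length : Int) := by
    have := List.length_pos_iff.mpr hw
    omega
  rw [Bool.or_eq_true, pv_checkA_iff, pv_checkA_iff]
  unfold pvDiagEq
  rw [pv_map_pyRange_eq_iff _ _ _ (by omega) (by simp),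
      pv_map_pyRange_eq_iff _ _ _ (by omega) (by simp)]
  constructor
  · rintro (hf | ht)
    · have h0 := hf 0 le_rfl (by omega)
      have hE := hf ((word.toList.length : Int) - 1) (by omega) (by omega)
      refine ⟨by rcases hdc with h | h <;> subst h <;>
        simp only [add_zero, mul_one, mul_neg_one] at h0 hE ⊢ <;> omega,
        Or.inl ?_⟩
      intro k hk
      have hcell := (hf (k : Int) (by omega) (by omega)).2.2.2.2
      rw [if_neg (by simp : ¬ (false = true))] at hcell
      rw [PySem.List.pyGetD_natCast, List.getD_eq_getElem _ _ (by omega)] at hcell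
      simpa using hcell
    · have h0 := ht 0 le_rfl (by omega)
      have hE := ht ((word.toList.length : Int) - 1) (by omega) (by omega)
      refine ⟨by rcases hdc with h | h <;> subst h <;>
        simp only [add_zero, mul_one, mul_neg_one] at h0 hE ⊢ <;> omega,
        Or.inr ?_⟩
      intro k hk
      have hcell := (ht (k : Int) (by omega) (by omega)).2.2.2.2
      rw [if_pos rfl] at hcell
      have hidx : ((word.toList.length : Int) - (k : Int) - 1)
          = ((word.toList.length - 1 - k : Nat) : Int) := by omega
      rw [hidx, PySem.List.pyGetD_natCast, List.getD_eq_getElem _ _ (by omega)] at hcell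
      rw [List.getElem_reverse]
      simpa [show (word.toList.map (fun ch => String.ofList [ch])).length - 1 - k
          = word.toList.length - 1 - k from by simp] using hcell
  · rintro ⟨hb, hcw | hcr⟩
    · left
      intro i h1 h2
      refine ⟨by omega, by omega,
        by rcases hdc with h | h <;> subst h <;>
          simp only [mul_one, mul_neg_one, le_min_iff, max_lt_iff] at hb ⊢ <;> omega,
        by rcases hdc with h | h <;> subst h <;>
          simp only [mul_one, mul_neg_one, le_min_iff, max_lt_iff] at hb ⊢ <;> omega, ?_⟩
      have hcell := hcw i.toNat (by omega)
      rw [show ((i.toNat : Nat) : Int) = i from by omega] at hcell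
      rw [if_neg (by simp : ¬ (false = true))]
      rw [PySem.List.pyGetD_of_nonneg _ _ h1, List.getD_eq_getElem _ _ (by omega)]
      simpa using hcell
    · right
      intro i h1 h2
      refine ⟨by omega, by omega,
        by rcases hdc with h | h <;> subst h <;>
          simp only [mul_one, mul_neg_one, le_min_iff, max_lt_iff] at hb ⊢ <;> omega,
        by rcases hdc with h | h <;> subst h <;>
          simp only [mul_one, mul_neg_one, le_min_iff, max_lt_iff] at hb ⊢ <;> omega, ?_⟩
      have hcell := hcr i.toNat (by omega)
      rw [show ((i.toNat : Nat) : Int) = i from by omega] at hcell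
      rw [List.getElem_reverse] at hcell
      rw [if_pos rfl]
      rw [PySem.List.pyGetD_of_nonneg _ _
          (by omega : (0:Int) ≤ (word.toList.length : Int) - i - 1),
        List.getD_eq_getElem _ _ (by omega)]
      have hidx : ((word.toList.length : Int) - i - 1).toNat
          = word.toList.length - 1 - i.toNat := by omega
      simp only [hidx]
      simpa [show (word.toList.map (fun ch => String.ofList [ch])).length - 1 - i.toNat
          = word.toList.length - 1 - i.toNat from by simp] using hcell

-- membership in the union accumulated over the diagonals
theorem pv_mem_foldl_union {α β : Type} [BEq α] [LawfulBEq α]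
    (g : β → PySem.Set α) (l : List β) (s : PySem.Set α) (x : α) :
    x ∈ l.foldl (fun s d => PySem.Set.union s (g d)) s ↔ x ∈ s ∨ ∃ d ∈ l, x ∈ g d := by
  induction l generalizing s with
  | nil => simp
  | cons y t ih =>
    simp only [List.foldl_cons, ih, PySem.Set.mem_union, List.mem_cons]
    constructor
    · rintro ((h | h) | ⟨d, hd, hx⟩)
      · exact Or.inl h
      · exact Or.inr ⟨y, Or.inl rfl, h⟩
      · exact Or.inr ⟨d, Or.inr hd, hx⟩
    · rintro (h | ⟨d, (rfl | hd), hx⟩)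
      · exact Or.inl (Or.inl h)
      · exact Or.inl (Or.inr hx)
      · exact Or.inr ⟨d, hd, hx⟩

theorem pv_nodup_foldl_union {α β : Type} [BEq α] [LawfulBEq α]
    (g : β → PySem.Set α) (l : List β) (s : PySem.Set α) (hs : s.Nodup) :
    (l.foldl (fun s d => PySem.Set.union s (g d)) s).Nodup := by
  induction l generalizing s with
  | nil => exact hs
  | cons y t ih => exact ih _ (PySem.Set.nodup_union _ _ hs)

-- membership in the window-scan accumulator of pvB_starts
theorem pv_mem_foldl_add_if {α β : Type} [BEq α] [LawfulBEq α]
    (p : β → Bool) (f : β → α) (l : List β) (s : PySem.Set α) (x : α) :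
    x ∈ l.foldl (fun s b => if p b then PySem.Set.add s (f b) else s) s ↔
      x ∈ s ∨ ∃ b ∈ l, p b = true ∧ x = f b := by
  induction l generalizing s with
  | nil => simp
  | cons y t ih =>
    simp only [List.foldl_cons, List.mem_cons]
    by_cases hy : p y = true
    · rw [if_pos hy, ih, PySem.Set.mem_add]
      constructor
      · rintro ((h | h) | ⟨b, hb, hpb, hx⟩)
        · exact Or.inl h
        · exact Or.inr ⟨y, Or.inl rfl, hy, h⟩
        · exact Or.inr ⟨b, Or.inr hb, hpb, hx⟩
      · rintro (h | ⟨b, (rfl | hb), hpb, hx⟩)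
        · exact Or.inl (Or.inl h)
        · exact Or.inl (Or.inr hx)
        · exact Or.inr ⟨b, hb, hpb, hx⟩
    · rw [if_neg hy, ih]
      constructor
      · rintro (h | ⟨b, hb, hpb, hx⟩)
        · exact Or.inl h
        · exact Or.inr ⟨b, Or.inr hb, hpb, hx⟩
      · rintro (h | ⟨b, (rfl | hb), hpb, hx⟩)
        · exact Or.inl h
        · exact (hy hpb).elim
        · exact Or.inr ⟨b, hb, hpb, hx⟩

-- a slice of a comprehension over a range is the shifted comprehension
theorem pv_slice_map_pyRange {α : Type} (f : Int → α) (a b p L : Int)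
    (hp : 0 ≤ p) (hL : 0 ≤ L) (hpb : p + L ≤ b - a) :
    PySem.List.slice ((PySem.List.pyRange a b 1).map f) (some p) (some (p + L)) =
      (PySem.List.pyRange 0 L 1).map (fun i => f (a + p + i)) := by
  rw [PySem.List.slice_toNat _ hp (by omega)]
  apply List.ext_getElem
  · simp [PySem.List.length_pyRange_one]; omega
  · intro k h1 h2
    simp only [List.getElem_take, List.getElem_drop, List.getElem_map,
      PySem.List.getElem_pyRange_one]
    congr 1
    omega

-- membership in starts(line) for a diagonal line given as a comprehension over a range of rows
theorem pv_mem_starts (matrix : List (List String)) (L : Int) (W Rv : List String)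
    (g : Int → Int × Int) (r0 r1 : Int) (x : Int × Int) (hL : 0 < L) :
    x ∈ pvB_starts matrix L W Rv ((PySem.List.pyRange r0 r1 1).map g) ↔
      ∃ p : Int, 0 ≤ p ∧ p + L ≤ r1 - r0 ∧
        ((PySem.List.pyRange 0 L 1).map (fun i => pvCell matrix (g (r0 + p + i)).1 (g (r0 + p + i)).2) = W ∨
         (PySem.List.pyRange 0 L 1).map (fun i => pvCell matrix (g (r0 + p + i)).1 (g (r0 + p + i)).2) = Rv) ∧
        x = g (r0 + p) := by
  unfold pvB_starts
  simp only [List.map_map]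
  rw [pv_mem_foldl_add_if]
  simp only [PySem.Set.empty, List.not_mem_nil, false_or, PySem.List.mem_pyRange_one,
    PySem.List.len_eq, List.length_map, PySem.List.length_pyRange_one]
  constructor
  · rintro ⟨p, ⟨hp0, hpN⟩, hcond, hx⟩
    have hple : p + L ≤ r1 - r0 := by omega
    refine ⟨p, hp0, hple, ?_, ?_⟩
    · rw [pv_slice_map_pyRange _ r0 r1 p L hp0 (by omega) hple] at hcond
      simp only [Bool.or_eq_true, beq_iff_eq] at hcond
      exact hcond
    · rw [hx, show p = ((p.toNat : Nat) : Int) from by omega,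
        PySem.List.pyGetD_map_pyRange_one g r0 r1 p.toNat (0, 0) (by omega)]
  · rintro ⟨p, hp0, hple, hcond, hx⟩
    refine ⟨p, ⟨hp0, by omega⟩, ?_, ?_⟩
    · rw [pv_slice_map_pyRange _ r0 r1 p L hp0 (by omega) hple]
      simp only [Bool.or_eq_true, beq_iff_eq]
      exact hcond
    · rw [hx, show p = ((p.toNat : Nat) : Int) from by omega,
        PySem.List.pyGetD_map_pyRange_one g r0 r1 p.toNat (0, 0) (by omega)]

theorem pv_map_cell_congr (m : List (List String)) (l : List Int) (A B A' B' : Int → Int)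
    (hA : ∀ i, A i = A' i) (hB : ∀ i, B i = B' i) :
    l.map (fun i => pvCell m (A i) (B i)) = l.map (fun i => pvCell m (A' i) (B' i)) :=
  List.map_congr_left (fun i _ => by rw [hA i, hB i])

theorem pv_mem_dr (matrix : List (List String)) (rows cols L : Int) (W Rv : List String)
    (x : Int × Int) (hL : 0 < L) :
    x ∈ (PySem.List.pyRange (-(rows - 1)) cols 1).foldl
      (fun s d => PySem.Set.union s
        (pvB_starts matrix L W Rv
          ((PySem.List.pyRange (max 0 (-d)) (min rows (cols - d)) 1).map (fun r => (r, r + d)))))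
      PySem.Set.empty ↔ pvDR matrix rows cols L W Rv x.1 x.2 := by
  rw [pv_mem_foldl_union]
  simp only [PySem.Set.empty, List.not_mem_nil, false_or, PySem.List.mem_pyRange_one]
  unfold pvDR pvDiagEq
  constructor
  · rintro ⟨d, ⟨hd1, hd2⟩, hmem⟩
    rw [pv_mem_starts matrix L W Rv _ _ _ x hL] at hmem
    obtain ⟨p, hp0, hple, hdiag, hx⟩ := hmem
    have hx1 : x.1 = max 0 (-d) + p := by rw [hx]
    have hx2 : x.2 = max 0 (-d) + p + d := by rw [hx]
    refine ⟨by omega, by omega, by omega, by omega, ?_⟩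
    rcases hdiag with h | h
    · exact Or.inl ((pv_map_cell_congr matrix _ _ _ _ _
        (fun i => by simp <;> omega) (fun i => by simp <;> omega)).trans h)
    · exact Or.inr ((pv_map_cell_congr matrix _ _ _ _ _
        (fun i => by simp <;> omega) (fun i => by simp <;> omega)).trans h)
  · rintro ⟨h1, h2, h3, h4, hdiag⟩
    refine ⟨x.2 - x.1, ⟨by omega, by omega⟩, ?_⟩
    rw [pv_mem_starts matrix L W Rv _ _ _ x hL]
    refine ⟨x.1 - max 0 (-(x.2 - x.1)), by omega, by omega, ?_, ?_⟩
    · rcases hdiag with h | h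
      · exact Or.inl ((pv_map_cell_congr matrix _ _ _ _ _
          (fun i => by simp <;> omega) (fun i => by simp <;> omega)).trans h)
      · exact Or.inr ((pv_map_cell_congr matrix _ _ _ _ _
          (fun i => by simp <;> omega) (fun i => by simp <;> omega)).trans h)
    · have : x = (x.1, x.2) := rfl
      rw [this]
      simp only [Prod.mk.injEq]
      constructor <;> omega

theorem pv_mem_dl (matrix : List (List String)) (rows cols L : Int) (W Rv : List String)
    (x : Int × Int) (hL : 0 < L) :
    x ∈ (PySem.List.pyRange 0 (rows + cols - 1) 1).foldl
      (fun s d => PySem.Set.union s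
        (pvB_starts matrix L W Rv
          ((PySem.List.pyRange (max 0 (d - (cols - 1))) (min rows (d + 1)) 1).map (fun r => (r, d - r)))))
      PySem.Set.empty ↔ pvDL matrix rows cols L W Rv x.1 x.2 := by
  rw [pv_mem_foldl_union]
  simp only [PySem.Set.empty, List.not_mem_nil, false_or, PySem.List.mem_pyRange_one]
  unfold pvDL pvDiagEq
  constructor
  · rintro ⟨d, ⟨hd1, hd2⟩, hmem⟩
    rw [pv_mem_starts matrix L W Rv _ _ _ x hL] at hmem
    obtain ⟨p, hp0, hple, hdiag, hx⟩ := hmem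
    have hx1 : x.1 = max 0 (d - (cols - 1)) + p := by rw [hx]
    have hx2 : x.2 = d - (max 0 (d - (cols - 1)) + p) := by rw [hx]
    refine ⟨by omega, by omega, by omega, by omega, ?_⟩
    rcases hdiag with h | h
    · exact Or.inl ((pv_map_cell_congr matrix _ _ _ _ _
        (fun i => by simp <;> omega) (fun i => by simp <;> omega)).trans h)
    · exact Or.inr ((pv_map_cell_congr matrix _ _ _ _ _
        (fun i => by simp <;> omega) (fun i => by simp <;> omega)).trans h)
  · rintro ⟨h1, h2, h3, h4, hdiag⟩
    refine ⟨x.1 + x.2, ⟨by omega, by omega⟩, ?_⟩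
    rw [pv_mem_starts matrix L W Rv _ _ _ x hL]
    refine ⟨x.1 - max 0 (x.1 + x.2 - (cols - 1)), by omega, by omega, ?_, ?_⟩
    · rcases hdiag with h | h
      · exact Or.inl ((pv_map_cell_congr matrix _ _ _ _ _
          (fun i => by simp <;> omega) (fun i => by simp <;> omega)).trans h)
      · exact Or.inr ((pv_map_cell_congr matrix _ _ _ _ _
          (fun i => by simp <;> omega) (fun i => by simp <;> omega)).trans h)
    · have : x = (x.1, x.2) := rfl
      rw [this]
      simp only [Prod.mk.injEq]
      constructor <;> omega

-- pairs (r,c) with c drawn from a per-r list, as one flat list: nodup and membership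
theorem pv_nodup_pairs (l1 : List Int) (h1 : l1.Nodup) (f : Int → List Int)
    (hf : ∀ r, (f r).Nodup) :
    (l1.flatMap (fun r => (f r).map (fun c => ((r, c) : Int × Int)))).Nodup := by
  induction l1 with
  | nil => simp
  | cons y t ih =>
    rw [List.flatMap_cons, List.nodup_append]
    refine ⟨(hf y).map (fun a b hab => ((Prod.mk.injEq _ _ _ _).mp hab).2), ih (List.Nodup.of_cons h1), ?_⟩
    intro x hx x' hx'
    obtain ⟨c, -, rfl⟩ := List.mem_map.mp hx
    obtain ⟨r, hr, hmem⟩ := List.mem_flatMap.mp hx'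
    obtain ⟨c', -, rfl⟩ := List.mem_map.mp hmem
    intro heq
    have : y = r := ((Prod.mk.injEq _ _ _ _).mp heq).1
    exact (List.nodup_cons.mp h1).1 (this ▸ hr)

theorem pv_mem_pairs (l1 : List Int) (f : Int → List Int) (x : Int × Int) :
    x ∈ l1.flatMap (fun r => (f r).map (fun c => ((r, c) : Int × Int))) ↔
      x.1 ∈ l1 ∧ x.2 ∈ f x.1 := by
  simp only [List.mem_flatMap, List.mem_map]
  constructor
  · rintro ⟨r, hr, c, hc, rfl⟩
    exact ⟨hr, hc⟩
  · rintro ⟨h1, h2⟩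
    exact ⟨x.1, h1, x.2, h2, rfl⟩

-- A's whole per-cell test as one boolean, and its closed form
def pvCondA (matrix : List (List String)) (word : String) (rows cols r c : Int) : Bool :=
  (pvA_check matrix word rows cols ((word.toList.length : Int)) r c 1 1 false ||
   pvA_check matrix word rows cols ((word.toList.length : Int)) r c 1 1 true) &&
  (pvA_check matrix word rows cols ((word.toList.length : Int)) r (c + 2) 1 (-1) false ||
   pvA_check matrix word rows cols ((word.toList.length : Int)) r (c + 2) 1 (-1) true)

theorem pv_condA_iff (matrix : List (List String)) (word : String) (rows cols : Int)
    (hw : word.toList ≠ []) (r c : Int) :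
    pvCondA matrix word rows cols r c = true ↔
      (pvDR matrix rows cols ((word.toList.length : Int))
         (word.toList.map (fun ch => String.ofList [ch]))
         ((word.toList.map (fun ch => String.ofList [ch])).reverse) r c ∧
       pvDL matrix rows cols ((word.toList.length : Int))
         (word.toList.map (fun ch => String.ofList [ch]))
         ((word.toList.map (fun ch => String.ofList [ch])).reverse) r (c + 2)) := by
  have hL1 : 1 ≤ (word.toList.length : Int) := by
    have := List.length_pos_iff.mpr hw
    omega
  unfold pvCondA
  rw [Bool.and_eq_true,
    pv_check_or_iff matrix word rows cols 1 (Or.inl rfl) r c hw,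
    pv_check_or_iff matrix word rows cols (-1) (Or.inr rfl) r (c + 2) hw]
  unfold pvDR pvDL
  constructor
  · rintro ⟨⟨hb1, hd1⟩, ⟨hb2, hd2⟩⟩
    simp only [mul_one, mul_neg_one, le_min_iff, max_lt_iff] at hb1 hb2
    exact ⟨⟨by omega, by omega, by omega, by omega, hd1⟩,
           ⟨by omega, by omega, by omega, by omega, hd2⟩⟩
  · rintro ⟨⟨h11, h12, h13, h14, hd1⟩, ⟨h21, h22, h23, h24, hd2⟩⟩
    refine ⟨⟨?_, hd1⟩, ⟨?_, hd2⟩⟩ <;>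
      · simp only [mul_one, mul_neg_one, le_min_iff, max_lt_iff]
        omega

theorem pv_foldl_const_add (l : List Int) (k init : Int) :
    l.foldl (fun c _ => c + k) init = init + (l.length : Int) * k := by
  induction l generalizing init with
  | nil => simp
  | cons y t ih =>
    rw [List.foldl_cons, ih]
    simp only [List.length_cons]
    push_cast
    ring

theorem pv_sum_cast (R : List Int) (h : Int → Nat) :
    (R.map (fun r => ((h r : Nat) : Int))).sum = (((R.map h).sum : Nat) : Int) := by
  rw [Nat.cast_list_sum, List.map_map]
  rfl

-- the whole non-empty-word case, with rows/cols abstract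
theorem pv_main (matrix : List (List String)) (word : String) (rows cols : Int)
    (hword : word.toList ≠ []) :
    (PySem.List.pyRange 0 rows 1).foldl (fun count r =>
      (PySem.List.pyRange 0 cols 1).foldl (fun count c =>
        if pvCondA matrix word rows cols r c
        then count + 1 else count) count) (0 : Int) =
    ((PySem.List.pyRange (-(rows - 1)) cols 1).foldl
      (fun s d => PySem.Set.union s
        (pvB_starts matrix ((word.toList.length : Int))
          (word.toList.map (fun ch => String.ofList [ch]))
          ((word.toList.map (fun ch => String.ofList [ch])).reverse)
          ((PySem.List.pyRange (max 0 (-d)) (min rows (cols - d)) 1).map (fun r => (r, r + d)))))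
      PySem.Set.empty).foldl (fun acc rc =>
        if PySem.Set.contains
            ((PySem.List.pyRange 0 (rows + cols - 1) 1).foldl
              (fun s d => PySem.Set.union s
                (pvB_starts matrix ((word.toList.length : Int))
                  (word.toList.map (fun ch => String.ofList [ch]))
                  ((word.toList.map (fun ch => String.ofList [ch])).reverse)
                  ((PySem.List.pyRange (max 0 (d - (cols - 1))) (min rows (d + 1)) 1).map
                    (fun r => (r, d - r)))))
              PySem.Set.empty) (rc.1, rc.2 + 2)
        then acc + 1 else acc) (0 : Int) := by
  have hL1 : 1 ≤ (word.toList.length : Int) := by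
    have := List.length_pos_iff.mpr hword
    omega
  set dr := (PySem.List.pyRange (-(rows - 1)) cols 1).foldl
      (fun s d => PySem.Set.union s
        (pvB_starts matrix ((word.toList.length : Int))
          (word.toList.map (fun ch => String.ofList [ch]))
          ((word.toList.map (fun ch => String.ofList [ch])).reverse)
          ((PySem.List.pyRange (max 0 (-d)) (min rows (cols - d)) 1).map (fun r => (r, r + d)))))
      PySem.Set.empty with hdr
  set dl := (PySem.List.pyRange 0 (rows + cols - 1) 1).foldl
      (fun s d => PySem.Set.union s
        (pvB_starts matrix ((word.toList.length : Int))
          (word.toList.map (fun ch => String.ofList [ch]))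
          ((word.toList.map (fun ch => String.ofList [ch])).reverse)
          ((PySem.List.pyRange (max 0 (d - (cols - 1))) (min rows (d + 1)) 1).map
            (fun r => (r, d - r)))))
      PySem.Set.empty with hdl
  calc (PySem.List.pyRange 0 rows 1).foldl (fun count r =>
        (PySem.List.pyRange 0 cols 1).foldl (fun count c =>
          if pvCondA matrix word rows cols r c
          then count + 1 else count) count) (0 : Int)
      = (PySem.List.pyRange 0 rows 1).foldl (fun count r => count +
          (((PySem.List.pyRange 0 cols 1).countP (fun c => pvCondA matrix word rows cols r c) : Nat) : Int)) 0 :=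
        PySem.List.foldl_congr_mem _ _ _ _ (fun acc r _ => PySem.List.foldl_if_add_one _ _ _)
    _ = 0 + ((PySem.List.pyRange 0 rows 1).map (fun r =>
          (((PySem.List.pyRange 0 cols 1).countP (fun c => pvCondA matrix word rows cols r c) : Nat) : Int))).sum := by
        rw [PySem.List.foldl_add]
    _ = 0 + ((((PySem.List.pyRange 0 rows 1).map (fun r =>
          (PySem.List.pyRange 0 cols 1).countP (fun c => pvCondA matrix word rows cols r c))).sum : Nat) : Int) := by
        rw [pv_sum_cast]
    _ = dr.foldl (fun acc rc =>
          if PySem.Set.contains dl (rc.1, rc.2 + 2) then acc + 1 else acc) 0 := ?_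
  rw [PySem.List.foldl_if_add_one (fun rc : Int × Int => PySem.Set.contains dl (rc.1, rc.2 + 2)) dr 0]
  congr 1
  rw [Nat.cast_inj]
  have hFlen : ((PySem.List.pyRange 0 rows 1).map (fun r =>
        (PySem.List.pyRange 0 cols 1).countP (fun c => pvCondA matrix word rows cols r c))).sum =
      ((PySem.List.pyRange 0 rows 1).flatMap (fun r =>
        ((PySem.List.pyRange 0 cols 1).filter (fun c => pvCondA matrix word rows cols r c)).map
          (fun c => ((r, c) : Int × Int)))).length := by
    rw [List.length_flatMap]
    congr 1
    apply List.map_congr_left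
    intro r _
    rw [List.length_map, List.countP_eq_length_filter]
  rw [hFlen, List.countP_eq_length_filter]
  apply List.Perm.length_eq
  apply (List.perm_ext_iff_of_nodup ?_ ?_).mpr
  · intro x
    rw [pv_mem_pairs, List.mem_filter, List.mem_filter,
      PySem.List.mem_pyRange_one, PySem.List.mem_pyRange_one,
      pv_condA_iff matrix word rows cols hword x.1 x.2, hdr, hdl,
      pv_mem_dr matrix rows cols ((word.toList.length : Int)) _ _ x (by omega),
      PySem.Set.contains_iff,
      pv_mem_dl matrix rows cols ((word.toList.length : Int)) _ _ ((x.1, x.2 + 2) : Int × Int)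
        (by omega)]
    unfold pvDR pvDL
    constructor
    · rintro ⟨-, -, hA, hB⟩
      exact ⟨hA, hB⟩
    · rintro ⟨hA, hB⟩
      obtain ⟨a1, a2, a3, a4, a5⟩ := hA
      obtain ⟨b1, b2, b3, b4, b5⟩ := hB
      exact ⟨⟨a1, by omega⟩, ⟨a3, by omega⟩, ⟨a1, a2, a3, a4, a5⟩, ⟨b1, b2, b3, b4, b5⟩⟩
  · exact pv_nodup_pairs _ (PySem.List.nodup_pyRange_one _ _) _
      (fun r => List.Nodup.filter _ (PySem.List.nodup_pyRange_one _ _))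
  · exact List.Nodup.filter _
      (pv_nodup_foldl_union _ _ PySem.Set.empty List.nodup_nil)

-- ===== VERDICT (by name: the statement is the Claim_ definition above) =====
theorem find_2_diagonal_words_in_matrix_spec : Claim_equal_find_2_diagonal_words_in_matrix := by
  intro matrix word _hdom hpre
  obtain ⟨_hm, _hrow⟩ := hpre
  unfold Spec_find_2_diagonal_words_in_matrix find_2_diagonal_words_in_matrix
    find_2_diagonal_words_in_matrix_alt
  simp only [PySem.List.len_eq, PySem.Str.len_eq]
  by_cases hword : word.toList = []
  · -- empty word: every cell counts on both sides
    rw [if_pos (by simp [hword])]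
    simp only [hword, List.length_nil, Nat.cast_zero]
    have h00 : PySem.List.pyRange (0 : Int) 0 1 = [] := rfl
    simp only [pvA_check, h00, List.all_nil, Bool.or_self, Bool.and_self, if_true]
    calc (PySem.List.pyRange 0 ((matrix.length : Nat) : Int) 1).foldl (fun count _ =>
          (PySem.List.pyRange 0 (((PySem.List.pyGetD matrix 0 []).length : Nat) : Int) 1).foldl
            (fun count _ => count + 1) count) (0 : Int)
        = (PySem.List.pyRange 0 ((matrix.length : Nat) : Int) 1).foldl (fun count _ => count +
            ((PySem.List.pyRange 0 (((PySem.List.pyGetD matrix 0 []).length : Nat) : Int) 1).length : Int) * 1) 0 :=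
          PySem.List.foldl_congr_mem _ _ _ _ (fun acc r _ => pv_foldl_const_add _ 1 acc)
      _ = 0 + ((PySem.List.pyRange 0 ((matrix.length : Nat) : Int) 1).length : Int) *
            (((PySem.List.pyRange 0 (((PySem.List.pyGetD matrix 0 []).length : Nat) : Int) 1).length : Int) * 1) :=
          pv_foldl_const_add _ _ 0
      _ = ((matrix.length : Nat) : Int) * (((PySem.List.pyGetD matrix 0 []).length : Nat) : Int) := by
          simp [PySem.List.length_pyRange_one]
  · -- non-empty word
    rw [if_neg (by
      simp only [beq_iff_eq, Int.natCast_eq_zero]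
      exact fun h => hword (List.length_eq_zero_iff.mp h))]
    exact pv_main matrix word _ _ hword
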